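-- pv_equiv track=rewrite | github.com/StefanNazarov76/LeetCode | 1422_maximum_score_after_splitting_a_string.py | maxScore
-- ===== SOURCE A (Python) =====
-- def maxScore(s: str) -> int:
--     ans = 0
--
--     for i in range(len(s) - 1):
--         left = s[0:i + 1]
--         right = s[i + 1:]
--
--         score = left.count('0') + right.count('1')
--
--         ans = max(score, ans)
--
--     return ans
-- ===== SOURCE B (Python) =====
-- def maxScore(s: str) -> int:
--     # single pass: prefix zero count + remaining one count
--     ones = s.count('1')
--     zeros = 0
--     ans = 0
--     for ch in s[:-1]:
--         if ch == '0':
--             zeros += 1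
--         elif ch == '1':
--             ones -= 1
--         ans = max(ans, zeros + ones)
--     return ans
-- ===== Notes on version B (the rewrite author's own statement) =====
-- stated objective: faster
-- what changed: replaces the quadratic loop that re-slices and re-counts the string at every split with a single pass maintaining a running prefix zero count and a decremented total ones count
import Mathlib
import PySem

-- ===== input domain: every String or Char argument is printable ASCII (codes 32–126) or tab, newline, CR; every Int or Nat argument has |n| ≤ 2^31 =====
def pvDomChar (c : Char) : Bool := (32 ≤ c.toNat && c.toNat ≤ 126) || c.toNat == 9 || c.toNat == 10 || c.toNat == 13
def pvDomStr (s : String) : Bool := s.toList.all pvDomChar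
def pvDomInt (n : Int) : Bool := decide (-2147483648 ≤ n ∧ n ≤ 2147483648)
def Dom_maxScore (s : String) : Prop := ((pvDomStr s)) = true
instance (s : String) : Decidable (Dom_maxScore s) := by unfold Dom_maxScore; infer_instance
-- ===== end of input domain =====

-- B replaces A's per-split re-slice-and-recount with one pass keeping a prefix zero count
-- and a decremented total one count (objective: faster, asymptotic change).

-- ===== PORT A =====
def maxScore (s : String) : Int :=
  let ans : Int := 0
  (PySem.List.pyRange 0 (PySem.Str.len s - 1) 1).foldl
    (fun ans i =>
      let left := PySem.Str.slice s (some 0) (some (i + 1))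
      let right := PySem.Str.slice s (some (i + 1)) none
      let score : Int := (PySem.Str.count left "0" : Int) + (PySem.Str.count right "1" : Int)
      max score ans) ans

-- ===== PORT B =====
def maxScore_alt (s : String) : Int :=
  let ones : Int := (PySem.Str.count s "1" : Int)
  let st :=
    (PySem.Str.slice s none (some (-1))).toList.foldl
      (fun (st : Int × Int × Int) ch =>
        if ch = '0' then (max st.1 ((st.2.1 + 1) + st.2.2), st.2.1 + 1, st.2.2)
        else if ch = '1' then (max st.1 (st.2.1 + (st.2.2 - 1)), st.2.1, st.2.2 - 1)
        else (max st.1 (st.2.1 + st.2.2), st.2.1, st.2.2))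
      ((0 : Int), (0 : Int), ones)
  st.1

-- ===== PRECONDITION & SPEC =====
def Spec_maxScore (s : String) (out : Int) : Prop := out = maxScore_alt s
instance (s : String) (out : Int) : Decidable (Spec_maxScore s out) := by unfold Spec_maxScore; infer_instance

-- ===== CLAIM (what is proved, stated in full; the proofs are below) =====
def Claim_equal_maxScore : Prop := ∀ (s : String), Dom_maxScore s → Spec_maxScore s (maxScore s)

-- ===== LEMMAS AND PROOFS =====

-- common recursive description of the best split score: z = zeros in the processed prefix,
-- a = best score so far
def bestG (z a : Int) : List Char → Int
  | [] => a
  | [_] => a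
  | c :: d :: r =>
    let z' := z + (if c = '0' then (1 : Int) else 0)
    bestG z' (max (z' + ((d :: r).count '1' : Int)) a) (d :: r)

-- Python str.count with a single-character needle is List.count
theorem countGo_single (v : Char) :
    ∀ (fuel : Nat) (l : List Char) (acc : Nat), l.length ≤ fuel →
      PySem.Chars.count.go [v] fuel l acc = acc + l.count v := by
  intro fuel
  induction fuel with
  | zero =>
    intro l acc h
    cases l with
    | nil => simp [PySem.Chars.count.go]
    | cons c t => simp at h
  | succ n ih =>
    intro l acc h
    cases l with
    | nil => simp [PySem.Chars.count.go]
    | cons c t =>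
      by_cases hc : v = c
      · subst hc
        have hb : ([v].isPrefixOf (v :: t)) = true := by simp [List.isPrefixOf]
        simp only [PySem.Chars.count.go, hb, if_true, List.length_singleton,
          List.drop_succ_cons, List.drop_zero]
        rw [ih t (acc + 1) (by simpa using h)]
        simp [List.count_cons_self]
        omega
      · have hb : ([v].isPrefixOf (c :: t)) = false := by
          simp [List.isPrefixOf]
          intro h'
          first | exact hc h' | exact hc h'.symm
        simp only [PySem.Chars.count.go, hb, Bool.false_eq_true, if_false]
        rw [ih t acc (by simpa using h)]
        rw [List.count_cons_of_ne (by first | exact hc | exact fun h' => hc h'.symm)]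

theorem count_single (l : List Char) (v : Char) :
    PySem.Chars.count l [v] = l.count v := by
  simp [PySem.Chars.count, countGo_single v l.length l 0 le_rfl]

-- A's indexed fold, written over take/drop of the character list, equals bestG
theorem afold_eq_bestG :
    ∀ (l : List Char) (z a : Int),
      (List.range (l.length - 1)).foldl
        (fun ans k =>
          max (z + (((l.take (k + 1)).count '0' : Int) + ((l.drop (k + 1)).count '1' : Int))) ans)
        a = bestG z a l := by
  intro l
  induction l with
  | nil => intro z a; simp [bestG]
  | cons c t ih =>
    intro z a
    cases t with
    | nil => simp [bestG]
    | cons d r =>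
      have hlen : (c :: d :: r).length - 1 = r.length + 1 := by simp
      rw [hlen, List.range_succ_eq_map, List.foldl_cons, List.foldl_map]
      have hstep :
          (fun (ans : Int) (k : Nat) =>
            max (z + ((((c :: d :: r).take (k.succ + 1)).count '0' : Int) +
              (((c :: d :: r).drop (k.succ + 1)).count '1' : Int))) ans) =
          (fun (ans : Int) (k : Nat) =>
            max ((z + (if c = '0' then (1 : Int) else 0)) +
              ((((d :: r).take (k + 1)).count '0' : Int) +
               (((d :: r).drop (k + 1)).count '1' : Int))) ans) := by
        funext ans k
        congr 1
        simp only [Nat.succ_eq_add_one, List.take_succ_cons, List.drop_succ_cons,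
          List.count_cons]
        by_cases hc : c = '0' <;> simp [hc] <;> push_cast <;> ring
      have hinit :
          max (z + ((((c :: d :: r).take (0 + 1)).count '0' : Int) +
            (((c :: d :: r).drop (0 + 1)).count '1' : Int))) a =
          max ((z + (if c = '0' then (1 : Int) else 0)) + (((d :: r).count '1' : Int))) a := by
        congr 1
        simp only [List.take_succ_cons, List.take_zero, List.drop_succ_cons, List.drop_zero,
          List.count_cons, List.count_nil]
        by_cases hc : c = '0' <;> simp [hc] <;> push_cast <;> ring
      rw [hstep, hinit]
      have h := ih (z + (if c = '0' then (1 : Int) else 0))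
        (max ((z + (if c = '0' then (1 : Int) else 0)) + (((d :: r).count '1' : Int))) a)
      simp only [List.length_cons, Nat.add_sub_cancel] at h
      rw [h]
      simp [bestG]

-- B's one-pass tuple fold over dropLast equals bestG when fed the live ones count
theorem bfold_eq_bestG :
    ∀ (l : List Char) (z a : Int),
      ((l.dropLast).foldl
        (fun (st : Int × Int × Int) ch =>
          if ch = '0' then (max st.1 ((st.2.1 + 1) + st.2.2), st.2.1 + 1, st.2.2)
          else if ch = '1' then (max st.1 (st.2.1 + (st.2.2 - 1)), st.2.1, st.2.2 - 1)
          else (max st.1 (st.2.1 + st.2.2), st.2.1, st.2.2))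
        (a, z, (l.count '1' : Int))).1 = bestG z a l := by
  intro l
  induction l with
  | nil => intro z a; simp [bestG]
  | cons c t ih =>
    intro z a
    cases t with
    | nil => simp [bestG]
    | cons d r =>
      rw [List.dropLast_cons₂, List.foldl_cons]
      by_cases hc0 : c = '0'
      · subst hc0
        have hcount : ((('0' : Char) :: d :: r).count '1' : Int) = ((d :: r).count '1' : Int) := by
          rw [List.count_cons_of_ne (by decide)]
        simp only [reduceIte]
        rw [hcount, ih (z + 1) (max a ((z + 1) + ((d :: r).count '1' : Int)))]
        simp only [bestG, reduceIte]
        rw [max_comm a ((z + 1) + ((d :: r).count '1' : Int))]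
      · by_cases hc1 : c = '1'
        · subst hc1
          have hcount : ((('1' : Char) :: d :: r).count '1' : Int) - 1 = ((d :: r).count '1' : Int) := by
            rw [List.count_cons_self]; push_cast; ring
          simp only [reduceIte]
          rw [hcount, if_neg (show ¬(('1' : Char) = '0') from by decide),
            ih z (max a (z + ((d :: r).count '1' : Int)))]
          simp only [bestG, if_neg hc0, add_zero]
          rw [max_comm a (z + ((d :: r).count '1' : Int))]
        · have hcount : ((c :: d :: r).count '1' : Int) = ((d :: r).count '1' : Int) := by
            rw [List.count_cons_of_ne (by first | exact Ne.symm hc1 | exact hc1)]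
          simp only [if_neg hc0, if_neg hc1]
          rw [hcount, ih z (max a (z + ((d :: r).count '1' : Int)))]
          simp only [bestG, if_neg hc0, add_zero]
          rw [max_comm a (z + ((d :: r).count '1' : Int))]

theorem toList_zero : ("0" : String).toList = ['0'] := by decide
theorem toList_one : ("1" : String).toList = ['1'] := by decide

theorem maxScore_eq_bestG (s : String) : maxScore s = bestG 0 0 s.toList := by
  have h := afold_eq_bestG s.toList 0 0
  simp only [zero_add] at h
  rw [← h]
  simp only [maxScore, PySem.Str.len_eq, PySem.List.pyRange_one, List.foldl_map]
  have hn : ((s.toList.length : Int) - 1 - 0).toNat = s.toList.length - 1 := by omega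
  rw [hn]
  refine PySem.List.foldl_congr_mem _ _ _ _ ?_
  intro acc x hx
  simp only [zero_add]
  rw [PySem.Str.count_eq, PySem.Str.count_eq, toList_zero, toList_one,
    PySem.Str.toList_slice, PySem.Str.toList_slice,
    PySem.Chars.slice_eq_listSlice, PySem.Chars.slice_eq_listSlice,
    count_single, count_single]
  have hk : ((x : Int) + 1) = ((x + 1 : Nat) : Int) := by push_cast; ring
  rw [PySem.List.slice_zero_start, hk, PySem.List.slice_to_natCast,
    PySem.List.slice_from_natCast]

theorem maxScore_alt_eq_bestG (s : String) : maxScore_alt s = bestG 0 0 s.toList := by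
  simp only [maxScore_alt]
  rw [PySem.Str.slice_to_neg_one, PySem.Str.count_eq, toList_one, count_single]
  exact bfold_eq_bestG s.toList 0 0

-- ===== VERDICT (by name: the statement is the Claim_ definition above) =====
theorem maxScore_spec : Claim_equal_maxScore := by
  intro s _
  unfold Spec_maxScore
  rw [maxScore_eq_bestG, maxScore_alt_eq_bestG]
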